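-- pv_equiv track=rewrite | github.com/minnsong/class-action | minefield/views.py | build_students_str
-- ===== SOURCE A (Python) =====
-- def build_students_str(members):
-- 	last = len(members) - 1
-- 	i = 0
-- 	team = ''
-- 	for m in members:
-- 		if i == last:
-- 			team += ' & ' +  m
-- 		elif i == 0:
-- 			team += m
-- 		else:
-- 			team += ', ' + m
-- 		i += 1
-- 	return team
-- ===== SOURCE B (Python) =====
-- def build_students_str(members):
-- 	if not members:
-- 		return ''
-- 	return ', '.join(members[:-1]) + ' & ' + members[-1]
-- ===== Notes on version B (the rewrite author's own statement) =====
-- stated objective: simpler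
-- what changed: Replaces the index-tracking accumulator loop with a guard plus a single str.join of all-but-last followed by ' & ' + last (which reproduces the one-element ' & name' case naturally).
import Mathlib
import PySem

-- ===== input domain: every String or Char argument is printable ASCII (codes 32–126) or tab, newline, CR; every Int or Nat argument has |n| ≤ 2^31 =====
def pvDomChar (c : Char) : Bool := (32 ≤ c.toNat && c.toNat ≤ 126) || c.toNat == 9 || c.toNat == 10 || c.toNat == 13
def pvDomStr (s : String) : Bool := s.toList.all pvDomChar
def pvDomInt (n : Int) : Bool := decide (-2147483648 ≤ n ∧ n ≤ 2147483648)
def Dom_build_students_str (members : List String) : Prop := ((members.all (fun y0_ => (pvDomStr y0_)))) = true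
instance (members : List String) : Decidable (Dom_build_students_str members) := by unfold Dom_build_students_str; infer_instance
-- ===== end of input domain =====

-- B replaces A's index-tracking accumulator loop by a guard plus one join of all-but-last
-- followed by ' & ' + last (objective: simpler).

-- ===== PORT A =====
-- one iteration of A's for-loop: state is (i, team), `last` is fixed outside the loop
def pvStepA (last : Int) (st : Int × String) (m : String) : Int × String :=
  if st.1 == last then (st.1 + 1, st.2 ++ " & " ++ m)
  else if st.1 == 0 then (st.1 + 1, st.2 ++ m)
  else (st.1 + 1, st.2 ++ ", " ++ m)

def build_students_str (members : List String) : String :=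
  let last : Int := (members.length : Int) - 1
  (members.foldl (pvStepA last) (0, "")).2

-- ===== PORT B =====
def build_students_str_alt (members : List String) : String :=
  if h : members = [] then ""
  else PySem.Str.join ", " members.dropLast ++ " & " ++ members.getLast h

-- ===== PRECONDITION & SPEC =====
def Spec_build_students_str (members : List String) (out : String) : Prop := out = build_students_str_alt members
instance (members : List String) (out : String) : Decidable (Spec_build_students_str members out) := by unfold Spec_build_students_str; infer_instance

-- ===== CLAIM (what is proved, stated in full; the proofs are below) =====
def Claim_equal_build_students_str : Prop := ∀ (members : List String), Dom_build_students_str members → Spec_build_students_str members (build_students_str members)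

-- ===== LEMMAS AND PROOFS =====

-- ", " prefixed to each element, concatenated (spec helper for the middle elements)
def pvMids (l : List String) : String := l.foldr (fun s acc => ", " ++ s ++ acc) ""

-- A's loop on a nonempty suffix xs starting at index i ≥ 1 (with the fixed `last`
-- equal to i + |xs| - 1) appends ', m' for each middle element and ' & last' at the end.
theorem pvLoopA (xs : List String) : ∀ (i : Int) (team : String), 1 ≤ i → (h : xs ≠ []) →
    (List.foldl (pvStepA (i + xs.length - 1)) (i, team) xs).2
      = team ++ pvMids xs.dropLast ++ " & " ++ xs.getLast h := by
  induction xs with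
  | nil => intro _ _ _ h; exact absurd rfl h
  | cons x ys ih =>
    intro i team hi h
    cases ys with
    | nil =>
      simp [pvStepA, pvMids]
    | cons y zs =>
      have hne : (y :: zs) ≠ [] := by simp
      have hrec := ih (i + 1) (team ++ ", " ++ x) (by omega) hne
      have harg : (i + ((x :: y :: zs).length : Nat) - 1 : Int) = (i + 1) + ((y :: zs).length : Nat) - 1 := by
        push_cast [List.length_cons]; ring
      rw [List.foldl_cons, harg]
      have hstep : pvStepA ((i+1) + ((y :: zs).length : Nat) - 1) (i, team) x = (i + 1, team ++ ", " ++ x) := by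
        simp only [pvStepA]
        rw [if_neg, if_neg]
        · simp only [beq_iff_eq]; omega
        · simp only [beq_iff_eq, List.length_cons]; push_cast; omega
      rw [hstep, hrec]
      simp [pvMids, List.getLast_cons, String.append_assoc]

-- PySem.Str.join ", " (m :: l) = m followed by each further element prefixed with ", "
theorem pvJoinCons (m : String) (l : List String) :
    PySem.Str.join ", " (m :: l) = m ++ pvMids l := by
  induction l generalizing m with
  | nil =>
    apply String.toList_injective
    simp [PySem.Chars.join_singleton, pvMids]
  | cons y ys ih =>
    have h2 := ih y
    apply String.toList_injective
    have e1 : (PySem.Str.join ", " (m :: y :: ys)).toList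
        = m.toList ++ (", ".toList ++ (PySem.Str.join ", " (y :: ys)).toList) := by
      simp [PySem.Chars.join_cons_cons]
    rw [e1, congrArg String.toList h2]
    simp [pvMids]

-- ===== VERDICT (by name: the statement is the Claim_ definition above) =====
theorem build_students_str_spec : Claim_equal_build_students_str := by
  intro members _
  unfold Spec_build_students_str build_students_str build_students_str_alt
  cases members with
  | nil => simp
  | cons m rest =>
    cases rest with
    | nil =>
      apply String.toList_injective
      simp [pvStepA, PySem.Chars.join_nil]
    | cons y zs =>
      have hne : (y :: zs) ≠ [] := by simp
      have hstep0 : pvStepA (((m :: y :: zs).length : Int) - 1) (0, "") m = (1, m) := by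
        simp only [pvStepA]
        rw [if_neg, if_pos]
        · rfl
        · simp
        · simp only [beq_iff_eq, List.length_cons]; push_cast; omega
      have harg : (((m :: y :: zs).length : Nat) : Int) - 1 = 1 + ((y :: zs).length : Nat) - 1 := by
        push_cast [List.length_cons]; ring
      rw [show ((m :: y :: zs).foldl (pvStepA ((((m :: y :: zs).length : Nat) : Int) - 1)) (0, "")).2
            = (List.foldl (pvStepA ((((m :: y :: zs).length : Nat) : Int) - 1)) (pvStepA ((((m :: y :: zs).length : Nat) : Int) - 1) (0, "") m) (y :: zs)).2 from rfl]
      rw [hstep0, harg, pvLoopA (y :: zs) 1 m le_rfl hne]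
      rw [dif_neg (by simp : ¬ (m :: y :: zs) = [])]
      rw [show (m :: y :: zs).dropLast = m :: (y :: zs).dropLast from by simp [List.dropLast]]
      rw [pvJoinCons]
      simp [List.getLast_cons, String.append_assoc]
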